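-- pv_equiv track=rewrite | github.com/therydin-hub/TopptipsApp | app.py | get_singles
-- ===== SOURCE A (Python) =====
-- def get_singles(row_str):
--     s1, sx, s2 = 0, 0, 0
--     for i in range(len(row_str)):
--         char = row_str[i]
--         if (i == 0 or row_str[i-1] != char) and (i == len(row_str)-1 or row_str[i+1] != char):
--             if char == '1': s1 += 1
--             elif char == 'X': sx += 1
--             else: s2 += 1
--     return s1, sx, s2, s1+sx+s2, max(s1, sx, s2)
-- ===== SOURCE B (Python) =====
-- def get_singles(row_str):
--     # run-length pass: a character is isolated exactly when its run has length 1
--     s1 = sx = s2 = 0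
--     i, n = 0, len(row_str)
--     while i < n:
--         j = i + 1
--         while j < n and row_str[j] == row_str[i]:
--             j += 1
--         if j - i == 1:
--             c = row_str[i]
--             if c == '1':
--                 s1 += 1
--             elif c == 'X':
--                 sx += 1
--             else:
--                 s2 += 1
--         i = j
--     return s1, sx, s2, s1 + sx + s2, max(s1, sx, s2)
-- ===== Notes on version B (the rewrite author's own statement) =====
-- stated objective: alternative
-- what changed: Replaces the per-index neighbor-comparison pass with a run-length scan: the string is consumed run by run of equal characters and a run of length exactly 1 increments the matching counter.
import Mathlib
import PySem

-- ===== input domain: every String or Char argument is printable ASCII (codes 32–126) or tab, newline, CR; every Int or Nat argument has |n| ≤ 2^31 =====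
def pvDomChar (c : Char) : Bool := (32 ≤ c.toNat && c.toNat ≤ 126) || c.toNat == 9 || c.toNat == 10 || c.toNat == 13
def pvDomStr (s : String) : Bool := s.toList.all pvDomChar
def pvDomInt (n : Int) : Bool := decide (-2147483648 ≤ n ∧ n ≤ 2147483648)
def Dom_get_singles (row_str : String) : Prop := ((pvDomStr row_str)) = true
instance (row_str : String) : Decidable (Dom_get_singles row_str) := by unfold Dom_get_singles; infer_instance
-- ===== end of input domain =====

-- B replaces A's per-index neighbor-comparison loop by a run-length scan (a character
-- is isolated exactly when its run of equal characters has length 1); same cost, alternative algorithm.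

-- ===== PORT A =====
-- loop body of A's 'for i in range(len(row_str))' (l = row_str as chars, n = len(row_str))
def stepA (l : List Char) (n : Int) (s : Int × Int × Int) (i : Int) : Int × Int × Int :=
  let char := PySem.List.pyGetD l i ' '
  if ((i == 0) || (PySem.List.pyGetD l (i - 1) ' ' != char)) &&
     ((i == n - 1) || (PySem.List.pyGetD l (i + 1) ' ' != char)) then
    if char == '1' then (s.1 + 1, s.2.1, s.2.2)
    else if char == 'X' then (s.1, s.2.1 + 1, s.2.2)
    else (s.1, s.2.1, s.2.2 + 1)
  else s

def get_singles (row_str : String) : Int × Int × Int × Int × Int :=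
  let l := row_str.toList
  let n : Int := PySem.Str.len row_str
  let st := (PySem.List.pyRange 0 n 1).foldl (stepA l n) (0, 0, 0)
  (st.1, st.2.1, st.2.2, st.1 + st.2.1 + st.2.2, max (max st.1 st.2.1) st.2.2)

-- ===== PORT B =====
-- 'if c == '1': s1 += 1 elif …' of Source B
def incB (c : Char) (s : Int × Int × Int) : Int × Int × Int :=
  if c == '1' then (s.1 + 1, s.2.1, s.2.2)
  else if c == 'X' then (s.1, s.2.1 + 1, s.2.2)
  else (s.1, s.2.1, s.2.2 + 1)

-- Source B's outer while loop; the inner 'while j < n and row_str[j] == row_str[i]' that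
-- advances j to the end of the current run is the takeWhile/dropWhile split of the tail
def runLoop : List Char → Int × Int × Int → Int × Int × Int
  | [], s => s
  | c :: t, s =>
      runLoop (t.dropWhile (· == c)) (if t.takeWhile (· == c) = [] then incB c s else s)
termination_by l => l.length
decreasing_by simpa using Nat.lt_succ_of_le (List.length_dropWhile_le (· == c) t)

def get_singles_alt (row_str : String) : Int × Int × Int × Int × Int :=
  let st := runLoop row_str.toList (0, 0, 0)
  (st.1, st.2.1, st.2.2, st.1 + st.2.1 + st.2.2, max (max st.1 st.2.1) st.2.2)

-- ===== PRECONDITION & SPEC =====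
def Spec_get_singles (row_str : String) (out : Int × Int × Int × Int × Int) : Prop := out = get_singles_alt row_str
instance (row_str : String) (out : Int × Int × Int × Int × Int) : Decidable (Spec_get_singles row_str out) := by unfold Spec_get_singles; infer_instance

-- ===== CLAIM (what is proved, stated in full; the proofs are below) =====
def Claim_equal_get_singles : Prop := ∀ (row_str : String), Dom_get_singles row_str → Spec_get_singles row_str (get_singles row_str)

-- ===== LEMMAS AND PROOFS =====

-- bridge: count isolated characters left to right, carrying the previous character
def count3 (prev : Option Char) : List Char → Int × Int × Int → Int × Int × Int
  | [], s => s
  | c :: t, s =>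
      count3 (some c) t (if prev ≠ some c ∧ t.head? ≠ some c then incB c s else s)

-- A's loop body at the head position of the unprocessed suffix
lemma stepA_head (pre : List Char) (c : Char) (t : List Char) (s : Int × Int × Int) :
    stepA (pre ++ c :: t) ((pre ++ c :: t).length : Int) s (pre.length : Int)
      = if pre.getLast? ≠ some c ∧ t.head? ≠ some c then incB c s else s := by
  have hchar : PySem.List.pyGetD (pre ++ c :: t) (pre.length : Int) ' ' = c := by
    rw [PySem.List.pyGetD_natCast, List.getD_append_right pre (c :: t) ' ' pre.length le_rfl]
    simp
  have hnext : ∀ h t', t = h :: t' →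
      PySem.List.pyGetD (pre ++ c :: t) ((pre.length : Int) + 1) ' ' = h := by
    intro h t' ht; subst ht
    rw [show ((pre.length : Int) + 1) = (((pre.length + 1 : Nat)) : Int) by push_cast; ring,
        PySem.List.pyGetD_natCast,
        show pre ++ c :: h :: t' = (pre ++ [c]) ++ h :: t' by simp,
        List.getD_append_right (pre ++ [c]) (h :: t') ' ' (pre.length + 1) (by simp)]
    simp
  rcases List.eq_nil_or_concat pre with hpre | ⟨p, d, hpre⟩ <;> subst hpre
  · -- pre = []
    cases t with
    | nil =>
      simp only [List.nil_append, List.length_nil, Nat.cast_zero] at hchar ⊢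
      simp only [stepA, hchar]
      norm_num [incB]
      intro hx
      exact absurd hx (by simp)
    | cons h t' =>
      have hn := hnext h t' rfl
      simp only [List.nil_append, List.length_nil, Nat.cast_zero, zero_add] at hchar hn ⊢
      simp only [stepA, hchar]
      have hBlast : ((0 : Int) == ((c :: h :: t').length : Int) - 1) = false := by
        simp only [beq_eq_false_iff_ne, ne_eq, List.length_cons]
        push_cast
        omega
      rw [hBlast]
      by_cases hh : h = c
      · rw [hh] at hn; simp [hh, hn]
      · simp [hh, hn, incB]
  · -- pre = p ++ [d]
    simp only [List.concat_eq_append] at hchar hnext ⊢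
    have hprev : PySem.List.pyGetD ((p ++ [d]) ++ c :: t) (((p ++ [d]).length : Int) - 1) ' ' = d := by
      rw [show (((p ++ [d]).length : Int) - 1) = ((p.length : Nat) : Int) by
            push_cast [List.length_append, List.length_cons, List.length_nil]; ring,
          PySem.List.pyGetD_natCast,
          show (p ++ [d]) ++ c :: t = p ++ d :: c :: t by simp,
          List.getD_append_right p (d :: c :: t) ' ' p.length le_rfl]
      simp
    have hB0 : ((((p ++ [d]).length : Nat) : Int) == (0 : Int)) = false := by
      simp only [beq_eq_false_iff_ne, ne_eq, List.length_append, List.length_cons, List.length_nil]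
      push_cast
      omega
    cases t with
    | nil =>
      simp only [stepA, hchar, hprev, List.getLast?_concat]
      have hBlast : ((((p ++ [d]).length : Nat) : Int)
          == ((((p ++ [d]) ++ c :: ([] : List Char)).length : Nat) : Int) - 1) = true := by
        simp only [beq_iff_eq, List.length_append, List.length_cons, List.length_nil]
        push_cast
        omega
      rw [hB0, hBlast]
      by_cases hd : d = c <;> simp [hd, incB]
    | cons h t' =>
      have hn := hnext h t' rfl
      simp only [stepA, hchar, hprev, hn, List.getLast?_concat]
      have hBlast : ((((p ++ [d]).length : Nat) : Int)
          == ((((p ++ [d]) ++ c :: h :: t').length : Nat) : Int) - 1) = false := by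
        simp only [beq_eq_false_iff_ne, ne_eq, List.length_append, List.length_cons, List.length_nil]
        push_cast
        omega
      rw [hB0, hBlast]
      by_cases hh : h = c
      · rw [hh] at hn; by_cases hd : d = c <;> simp [hd, hh]
      · by_cases hd : d = c <;> simp [hd, hh, incB]

-- A's fold over the remaining indices computes count3 of the remaining suffix
lemma Amain (suf : List Char) : ∀ (pre : List Char) (s : Int × Int × Int),
    (PySem.List.pyRange (pre.length : Int) ((pre.length : Int) + (suf.length : Int)) 1).foldl
      (stepA (pre ++ suf) ((pre ++ suf).length : Int)) s = count3 pre.getLast? suf s := by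
  induction suf with
  | nil =>
    intro pre s
    rw [show ((pre.length : Int) + (([] : List Char).length : Int)) = (pre.length : Int) by simp,
        PySem.List.pyRange_one_eq_nil le_rfl]
    rfl
  | cons c t ih =>
    intro pre s
    rw [PySem.List.pyRange_one_cons (by push_cast [List.length_cons]; omega), List.foldl_cons,
        stepA_head, count3]
    have hih := ih (pre ++ [c]) (if pre.getLast? ≠ some c ∧ t.head? ≠ some c then incB c s else s)
    rw [show ((pre ++ [c]) ++ t) = pre ++ c :: t by simp, List.getLast?_concat] at hih
    convert hih using 3 <;> push_cast [List.length_append, List.length_cons, List.length_nil] <;> ring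

-- consuming the rest of a run changes nothing when the previous character equals it
lemma count3_run (run : List Char) (c : Char) : ∀ (rest : List Char) (s : Int × Int × Int),
    (∀ x ∈ run, x = c) → rest.head? ≠ some c →
    count3 (some c) (run ++ rest) s = count3 (some c) rest s := by
  induction run with
  | nil => intro rest s _ _; rfl
  | cons d run' ih =>
    intro rest s hall hrest
    have hd : d = c := hall d (by simp)
    subst hd
    rw [List.cons_append, count3, if_neg (by simp)]
    exact ih rest s (fun x hx => hall x (by simp [hx])) hrest

-- B's run loop computes count3 whenever the previous character differs from the head
lemma Bmain (l : List Char) : ∀ (prev : Option Char) (s : Int × Int × Int),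
    (∀ c, l.head? = some c → prev ≠ some c) → runLoop l s = count3 prev l s := by
  induction hn : l.length using Nat.strong_induction_on generalizing l with
  | _ n ih =>
    match l with
    | [] => intro prev s _; rw [runLoop]; rfl
    | c :: t =>
      intro prev s hprev
      have hdw : ∀ c', (t.dropWhile (· == c)).head? = some c' → (some c : Option Char) ≠ some c' := by
        intro c' hc' hEq
        have h2 := List.head?_dropWhile_not (· == c) t
        rw [hc'] at h2
        simp at h2
        exact h2 (Option.some.inj hEq).symm
      have htw : (t.takeWhile (· == c) = []) ↔ t.head? ≠ some c := by
        cases t with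
        | nil => simp
        | cons h t' =>
          by_cases hh : h = c <;> simp [hh]
      rw [runLoop, ih (t.dropWhile (· == c)).length
            (by subst hn; simpa using Nat.lt_succ_of_le (List.length_dropWhile_le (· == c) t))
            _ rfl (some c) _ hdw, count3]
      have hstate : (if t.takeWhile (· == c) = [] then incB c s else s)
          = (if prev ≠ some c ∧ t.head? ≠ some c then incB c s else s) := by
        by_cases h1 : t.head? = some c
        · rw [if_neg (by simp [htw, h1]), if_neg (by simp [h1])]
        · rw [if_pos (htw.mpr h1), if_pos ⟨hprev c rfl, h1⟩]
      rw [hstate]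
      exact (count3_run (t.takeWhile (· == c)) c (t.dropWhile (· == c)) _
        (fun x hx => by simpa using (List.mem_takeWhile_imp hx))
        (fun h => by
          have := List.head?_dropWhile_not (· == c) t
          rw [h] at this; simp at this)).symm.trans
        (by rw [List.takeWhile_append_dropWhile])

-- ===== VERDICT (by name: the statement is the Claim_ definition above) =====
theorem get_singles_spec : Claim_equal_get_singles := by
  intro row_str _
  unfold Spec_get_singles get_singles get_singles_alt
  have hA := Amain row_str.toList [] (0, 0, 0)
  have hB := Bmain row_str.toList none (0, 0, 0) (by intro c _ h; simp at h)
  simp only [List.nil_append, List.length_nil, Nat.cast_zero, zero_add, List.getLast?_nil] at hA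
  have hlen : (PySem.Str.len row_str) = ((row_str.toList.length : Nat) : Int) := by
    simp [PySem.Str.len_eq]
  simp only [hlen, hB, hA]
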